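-- pv_equiv track=rewrite | github.com/ztz472947849/crypt_lowcase | string_strip.py | find_ord
-- ===== SOURCE A (Python) =====
-- def find_ord(string):
--     min,max=string[0],string[0]
--     for i in string:
--         if ord(i) < ord(min):
--             min=i
--         if ord(i) > ord(max) and ord(i)!=127:
--             max=i
--     return ord(min),ord(max)
-- ===== SOURCE B (Python) =====
-- def find_ord(string):
--     ords = [ord(c) for c in string]
--     return (min(ords), max(ords))
-- ===== Notes on version B (the rewrite author's own statement) =====
-- stated objective: simpler
-- what changed: B builds the ordinal list once and uses library min/max reductions instead of A's fused accumulator loop with branches; A's 127-exclusion branch never fires on the printable-ASCII domain, so it is dropped.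
import Mathlib
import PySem

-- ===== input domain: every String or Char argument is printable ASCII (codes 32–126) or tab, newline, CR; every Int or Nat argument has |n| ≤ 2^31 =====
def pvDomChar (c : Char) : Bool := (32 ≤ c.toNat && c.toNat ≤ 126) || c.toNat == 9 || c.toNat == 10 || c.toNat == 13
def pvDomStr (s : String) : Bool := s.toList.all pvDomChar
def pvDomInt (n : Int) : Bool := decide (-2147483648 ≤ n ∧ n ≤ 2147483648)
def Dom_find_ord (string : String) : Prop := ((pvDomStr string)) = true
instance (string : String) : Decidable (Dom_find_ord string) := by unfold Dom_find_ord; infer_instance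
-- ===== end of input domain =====

-- B replaces A's fused min/max accumulator loop by one ordinal list and two independent library reductions (objective: simpler).


-- ===== PORT A =====
-- A's loop: min,max start at string[0]; for each char, update min if smaller, update max if larger and not 127.
def find_ord (string : String) : Int × Int :=
  match string.toList with
  | [] => (0, 0)   -- unreachable: string[0] raises IndexError, excluded by Pre_
  | c :: _ =>
    let p := string.toList.foldl
      (fun (mm : Char × Char) (i : Char) =>
        ( if i.toNat < mm.1.toNat then i else mm.1,
          if i.toNat > mm.2.toNat && i.toNat != 127 then i else mm.2 )) (c, c)
    ((p.1.toNat : Int), (p.2.toNat : Int))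

-- ===== PORT B =====
def find_ord_alt (string : String) : Int × Int :=
  let ords := string.toList.map (fun c => (c.toNat : Int))
  ((PySem.List.min? ords (fun x => x)).getD 0,
   (PySem.List.max? ords (fun x => x)).getD 0)

-- ===== PRECONDITION & SPEC =====
-- A raises IndexError on the empty string (string[0]); B's min([]) raises ValueError there.
def Pre_find_ord (string : String) : Prop := string ≠ ""
instance (string : String) : Decidable (Pre_find_ord string) := by unfold Pre_find_ord; infer_instance
def pvWitness_find_ord : String := ("a")
def Spec_find_ord (string : String) (out : Int × Int) : Prop := out = find_ord_alt string
instance (string : String) (out : Int × Int) : Decidable (Spec_find_ord string out) := by unfold Spec_find_ord; infer_instance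

-- ===== CLAIM (what is proved, stated in full; the proofs are below) =====
def Claim_equal_find_ord : Prop := ∀ (string : String), Dom_find_ord string → Pre_find_ord string → Spec_find_ord string (find_ord string)

-- ===== LEMMAS AND PROOFS =====

-- A's loop step and B's reductions agree componentwise, as long as every scanned char is in the domain (so ≠ 127).
theorem pv_fold_lemma : ∀ (t : List Char) (c1 c2 : Char), t.all pvDomChar = true →
    (let p := t.foldl
      (fun (mm : Char × Char) (i : Char) =>
        ( if i.toNat < mm.1.toNat then i else mm.1,
          if i.toNat > mm.2.toNat && i.toNat != 127 then i else mm.2 )) (c1, c2)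
     (((p.1.toNat : Int), (p.2.toNat : Int)) : Int × Int))
    = ((t.map (fun c => (c.toNat : Int))).foldl min (c1.toNat : Int),
       (t.map (fun c => (c.toNat : Int))).foldl max (c2.toNat : Int)) := by
  intro t
  induction t with
  | nil => intros; simp
  | cons i t ih =>
    intro c1 c2 h
    simp only [List.all_cons, Bool.and_eq_true] at h
    have hi : i.toNat ≠ 127 := by
      have := h.1
      simp [pvDomChar] at this
      omega
    simp only [List.foldl_cons, List.map_cons]
    rw [ih _ _ h.2]
    congr 1
    · congr 1
      rw [Int.min_def]
      split_ifs with h1 h2 h2 <;> simp_all <;> omega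
    · congr 1
      rw [Int.max_def]
      split_ifs with h1 h2 h2 <;> simp_all <;> omega

-- ===== VERDICT (by name: the statement is the Claim_ definition above) =====
theorem find_ord_spec : Claim_equal_find_ord := by
  intro s hdom hpre
  unfold Spec_find_ord find_ord find_ord_alt
  have hne : s.toList ≠ [] := by
    simpa [String.toList_eq_nil_iff] using hpre
  match hl : s.toList with
  | [] => exact absurd hl hne
  | c :: t =>
    have hall : (c :: t).all pvDomChar = true := by
      have : pvDomStr s = true := hdom
      rw [pvDomStr, hl] at this; exact this
    simp only [PySem.List.min?_id_cons, PySem.List.max?_id_cons, List.map_cons,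
      Option.getD_some, List.foldl_cons]
    have hstep :
        ((if c.toNat < c.toNat then c else c),
         (if c.toNat > c.toNat && c.toNat != 127 then c else c)) = (c, c) := by
      simp
    rw [hstep]
    have := pv_fold_lemma t c c (by simp_all)
    simpa using this
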